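-- pv_equiv track=rewrite | github.com/zludyyy/LABS | лаба4/ЛР4.py | miu_system
-- ===== SOURCE A (Python) =====
-- from collections import deque
-- from typing import Set, Tuple, List
--
-- def miu_system(start: str, target: str, max_depth: int = 20, max_length: int = 50) -> Tuple[bool, List[str]]:
--     """
--     Проверяет, можно ли получить целевую строку из начальной по правилам системы MIU.
--
--     Правила MIU:
--     1. Если строка заканчивается на 'I', можно добавить 'U' в конец
--     2. Если строка начинается с 'M', можно удвоить часть после 'M'
--     3. В любой строке можно заменить любую подстроку 'III' на 'U'
--     4. В любой строке можно удалить подстроку 'UU'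
--     """
--
--     def apply_rule1(s: str) -> List[str]:
--         """Правило 1: если строка заканчивается на 'I', добавить 'U'"""
--         if s.endswith('I'):
--             return [s + 'U']
--         return []
--
--     def apply_rule2(s: str) -> List[str]:
--         """Правило 2: если строка начинается с 'M', удвоить часть после 'M'"""
--         if s.startswith('M'):
--             return [s + s[1:]]
--         return []
--
--     def apply_rule3(s: str) -> List[str]:
--         """Правило 3: заменить любую подстроку 'III' на 'U'"""
--         results = []
--         for i in range(len(s) - 2):
--             if s[i:i+3] == 'III':
--                 new_s = s[:i] + 'U' + s[i+3:]
--                 results.append(new_s)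
--         return results
--
--     def apply_rule4(s: str) -> List[str]:
--         """Правило 4: удалить подстроку 'UU'"""
--         results = []
--         for i in range(len(s) - 1):
--             if s[i:i+2] == 'UU':
--                 new_s = s[:i] + s[i+2:]
--                 results.append(new_s)
--         return results
--
--     # Для восстановления пути
--     parent = {start: None}
--
--     # BFS
--     queue = deque([start])
--     visited = {start}
--
--     while queue:
--         current = queue.popleft()
--
--         # Проверяем, достигли ли цели
--         if current == target:
--             # Восстанавливаем путь
--             path = []
--             node = current
--             while node is not None:
--                 path.append(node)
--                 node = parent[node]
--             path.reverse()
--             return True, path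
--
--         # Прекращаем поиск, если достигли максимальной глубины или длины
--         if len(current) > max_length or len(parent) > 10000:
--             continue
--
--         # Применяем все правила и получаем новые состояния
--         new_states = []
--         new_states.extend(apply_rule1(current))
--         new_states.extend(apply_rule2(current))
--         new_states.extend(apply_rule3(current))
--         new_states.extend(apply_rule4(current))
--
--         for new_state in new_states:
--             if new_state not in visited and len(new_state) <= max_length:
--                 visited.add(new_state)
--                 parent[new_state] = current
--                 queue.append(new_state)
--
--     return False, []
-- ===== SOURCE B (Python) =====
-- from typing import Tuple, List
--
--
-- def miu_system(start: str, target: str, max_depth: int = 20, max_length: int = 50) -> Tuple[bool, List[str]]: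
--     """Same BFS over the MIU rules, but built on different structures: the FIFO
--     queue is a two-list (front/back) functional queue instead of a deque, each
--     queue entry carries the path that reaches it (so no parent dict and no
--     backward reconstruction), and rules 3 and 4 come from one parametric
--     substring-rewrite helper.  len(visited) always equals len(parent) in the
--     original, so the 10000-guard is unchanged."""
--
--     def rewrites(s: str, old: str, new: str) -> List[str]:
--         k = len(old)
--         return [s[:i] + new + s[i + k:]
--                 for i in range(len(s) - k + 1) if s[i:i + k] == old]
--
--     def neighbors(s: str) -> List[str]:
--         out = []
--         if s.endswith('I'):                      # rule 1
--             out.append(s + 'U')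
--         if s.startswith('M'):                    # rule 2
--             out.append(s + s[1:])
--         return out + rewrites(s, 'III', 'U') + rewrites(s, 'UU', '')
--
--     front = [(start, [start])]
--     back = []                                    # newest first; push = prepend
--     visited = {start}
--
--     while front or back:
--         if not front:
--             front, back = back[::-1], []
--         current, path = front[0]
--         front = front[1:]
--         if current == target:
--             return True, path
--         if len(current) > max_length or len(visited) > 10000:
--             continue
--         for ns in neighbors(current):
--             if ns not in visited and len(ns) <= max_length:
--                 visited.add(ns)
--                 back = [(ns, path + [ns])] + back
--     return False, []
-- ===== Notes on version B (the rewrite author's own statement) =====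
-- stated objective: alternative
-- what changed: The BFS keeps its visit order and guards, but the deque is replaced by a two-list (front/back) functional queue, each queue entry carries the path that reached it (so the parent dictionary and the backward path-reconstruction loop disappear), and rules 3 and 4 come from one parametric substring-rewrite helper; the expansion guard reads len(visited), which always equals len(parent).
import Mathlib
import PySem

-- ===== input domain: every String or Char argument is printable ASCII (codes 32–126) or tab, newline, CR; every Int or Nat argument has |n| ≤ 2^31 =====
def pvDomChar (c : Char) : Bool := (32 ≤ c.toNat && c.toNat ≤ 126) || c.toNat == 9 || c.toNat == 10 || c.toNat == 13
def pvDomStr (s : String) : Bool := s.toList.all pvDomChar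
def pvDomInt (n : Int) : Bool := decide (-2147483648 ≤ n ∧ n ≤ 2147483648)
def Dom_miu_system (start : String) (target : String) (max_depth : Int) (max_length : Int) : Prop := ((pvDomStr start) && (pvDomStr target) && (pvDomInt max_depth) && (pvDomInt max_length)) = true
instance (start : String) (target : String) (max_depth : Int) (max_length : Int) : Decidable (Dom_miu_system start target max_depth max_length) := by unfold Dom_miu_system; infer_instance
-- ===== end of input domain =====

-- B replaces the deque by a two-list (front/back) functional queue, carries the
-- reaching path in each queue entry instead of a parent dict + backward
-- reconstruction, and derives rules 3/4 from one parametric substring-rewrite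
-- helper; same search order and results (objective: alternative).


-- Totality fuel for A's BFS while-loop: the number of pops is bounded by the number
-- of states ever enqueued, which is at most 10001 states while the 10000-guard is
-- open plus the children (≤ 2·len+2 ≤ 2·max_length+2) of the one expansion that
-- overflows it; the loop exits on an empty queue long before this runs out.
def pvFuel (max_length : Int) : Nat := 2 * max_length.toNat + 20100

-- ===== PORT A =====
def pvRule1 (s : String) : List String :=
  if PySem.Str.endswith s "I" then [s ++ "U"] else []

def pvRule2 (s : String) : List String :=
  if PySem.Str.startswith s "M" then [s ++ PySem.Str.slice s (some 1) none] else []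

def pvRule3 (s : String) : List String :=
  (PySem.List.pyRange 0 (PySem.Str.len s - 2) 1).foldl
    (fun results i =>
      if PySem.Str.slice s (some i) (some (i + 3)) = "III" then
        results ++ [PySem.Str.slice s none (some i) ++ "U" ++ PySem.Str.slice s (some (i + 3)) none]
      else results) []

def pvRule4 (s : String) : List String :=
  (PySem.List.pyRange 0 (PySem.Str.len s - 1) 1).foldl
    (fun results i =>
      if PySem.Str.slice s (some i) (some (i + 2)) = "UU" then
        results ++ [PySem.Str.slice s none (some i) ++ PySem.Str.slice s (some (i + 2)) none]
      else results) []

-- 'while node is not None: path.append(node); node = parent[node]'.  Fuel = dict size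
-- is always enough (the parent chain visits distinct keys); a missing key (Python
-- KeyError, unreachable in A's runs) is read as None here.
def pvRecon (parent : PySem.Dict String (Option String)) :
    Nat → Option String → List String → List String
  | _, none, path => path
  | 0, some _, path => path
  | fuel + 1, some s, path => pvRecon parent fuel ((parent.get? s).getD none) (path ++ [s])

def pvLoopA (target : String) (max_length : Int) :
    Nat → List String → PySem.Set String → PySem.Dict String (Option String) → Bool × List String
  | 0, _, _, _ => (false, [])
  | _ + 1, [], _, _ => (false, [])
  | fuel + 1, current :: queue, visited, parent =>
    if current = target then
      (true, (pvRecon parent parent.size (some current) []).reverse)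
    else if max_length < PySem.Str.len current ∨ 10000 < parent.size then
      pvLoopA target max_length fuel queue visited parent
    else
      let new_states := pvRule1 current ++ pvRule2 current ++ pvRule3 current ++ pvRule4 current
      let st := new_states.foldl
        (fun (acc : List String × PySem.Set String × PySem.Dict String (Option String)) ns =>
          if PySem.Set.contains acc.2.1 ns = false ∧ PySem.Str.len ns ≤ max_length then
            (acc.1 ++ [ns], PySem.Set.add acc.2.1 ns, acc.2.2.insert ns (some current))
          else acc)
        (queue, visited, parent)
      pvLoopA target max_length fuel st.1 st.2.1 st.2.2

def miu_system (start : String) (target : String) (_max_depth : Int) (max_length : Int) :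
    Bool × List String :=
  pvLoopA target max_length (pvFuel max_length) [start] (PySem.Set.ofList [start])
    (PySem.Dict.insert PySem.Dict.empty start none)

-- ===== PORT B =====
-- B's totality fuel for its while-loop; same bound as A's, written as B states it.
def pvFuelB (max_length : Int) : Nat := 20100 + max_length.toNat * 2

-- all results of rewriting one occurrence of `old` into `new`, left to right
def pvRewrites (s old new : String) : List String :=
  let k := PySem.Str.len old
  ((PySem.List.pyRange 0 (PySem.Str.len s - k + 1) 1).filter
      (fun i => PySem.Str.slice s (some i) (some (i + k)) = old)).map
    (fun i => PySem.Str.slice s none (some i) ++ new ++ PySem.Str.slice s (some (i + k)) none)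

def pvNeighbors (s : String) : List String :=
  (if PySem.Str.endswith s "I" then [s ++ "U"] else [])
    ++ (if PySem.Str.startswith s "M" then [s ++ PySem.Str.slice s (some 1) none] else [])
    ++ pvRewrites s "III" "U" ++ pvRewrites s "UU" ""

-- 'if not front: front, back = back[::-1], []' followed by popping front[0];
-- none = the while-condition 'front or back' is false.
def pvPopB {α : Type} : List α → List α →
    Option (α × List α × List α)
  | [], back =>
    match back.reverse with
    | [] => none
    | x :: front' => some (x, front', [])
  | x :: front', back => some (x, front', back)

def pvLoopB (target : String) (max_length : Int) :
    Nat → List (String × List String) → List (String × List String) → PySem.Set String →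
      Bool × List String
  | 0, _, _, _ => (false, [])
  | fuel + 1, front, back, visited =>
    match pvPopB front back with
    | none => (false, [])
    | some ((current, path), front', back') =>
      if current = target then (true, path)
      else if max_length < PySem.Str.len current ∨ (10000 : Int) < PySem.Set.len visited then
        pvLoopB target max_length fuel front' back' visited
      else
        let st := (pvNeighbors current).foldl
          (fun (acc : List (String × List String) × PySem.Set String) ns =>
            if PySem.Set.contains acc.2 ns = false ∧ PySem.Str.len ns ≤ max_length then
              ((ns, path ++ [ns]) :: acc.1, PySem.Set.add acc.2 ns)
            else acc)
          (back', visited)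
        pvLoopB target max_length fuel front' st.1 st.2

def miu_system_alt (start : String) (target : String) (_max_depth : Int) (max_length : Int) :
    Bool × List String :=
  pvLoopB target max_length (pvFuelB max_length) [(start, [start])] [] (PySem.Set.ofList [start])

-- ===== PRECONDITION & SPEC =====
def Spec_miu_system (start : String) (target : String) (max_depth : Int) (max_length : Int) (out : Bool × List String) : Prop := out = miu_system_alt start target max_depth max_length
instance (start : String) (target : String) (max_depth : Int) (max_length : Int) (out : Bool × List String) : Decidable (Spec_miu_system start target max_depth max_length out) := by unfold Spec_miu_system; infer_instance

-- ===== CLAIM (what is proved, stated in full; the proofs are below) =====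
def Claim_equal_miu_system : Prop := ∀ (start : String) (target : String) (max_depth : Int) (max_length : Int), Dom_miu_system start target max_depth max_length → Spec_miu_system start target max_depth max_length (miu_system start target max_depth max_length)

-- ===== LEMMAS AND PROOFS =====

-- p is the parent-chain of s in `parent` (oldest first), as A's reconstruction walks it.
inductive pvRec (parent : PySem.Dict String (Option String)) : String → List String → Prop
  | base {s : String} : parent.get? s = some none → pvRec parent s [s]
  | step {s t : String} {p : List String} : parent.get? s = some (some t) → s ∉ p →
      pvRec parent t p → pvRec parent s (p ++ [s])

theorem pvRec_key {parent : PySem.Dict String (Option String)} {s : String} {p : List String}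
    (h : pvRec parent s p) : ∀ x ∈ p, (parent.get? x).isSome := by
  induction h with
  | base hs => intro x hx; simp at hx; subst hx; simp_all
  | step hs hsp _ ih =>
    intro x hx
    rcases List.mem_append.1 hx with hx | hx
    · exact ih x hx
    · simp at hx; subst hx; simp_all

theorem pvRec_nodup {parent : PySem.Dict String (Option String)} {s : String} {p : List String}
    (h : pvRec parent s p) : p.Nodup := by
  induction h with
  | base _ => simp
  | step _ hsp _ ih =>
    simp only [List.nodup_append, List.nodup_cons]
    refine ⟨ih, by simp, ?_⟩
    intro a ha b hb h
    simp only [List.mem_singleton] at hb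
    subst hb; subst h
    exact hsp ha

theorem pvRec_length_le {parent : PySem.Dict String (Option String)} {s : String}
    {p : List String} (h : pvRec parent s p) (_hk : parent.keys.Nodup) :
    p.length ≤ parent.size := by
  have hsub : p ⊆ parent.keys := by
    intro x hx
    refine (PySem.Dict.contains_iff_mem_keys parent x).1 ?_
    rw [PySem.Dict.contains_eq_isSome_get?]
    exact pvRec_key h x hx
  have hle := (List.subperm_of_subset (pvRec_nodup h) hsub).length_le
  simpa [PySem.Dict.keys, PySem.Dict.size] using hle

theorem pvRec_stable {parent : PySem.Dict String (Option String)} {s : String} {p : List String}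
    (h : pvRec parent s p) {k : String} (hk : parent.contains k = false) (v : Option String) :
    pvRec (parent.insert k v) s p := by
  have hknot : parent.get? k = none := by
    have := PySem.Dict.contains_eq_isSome_get? parent k
    rw [hk] at this; cases hg : parent.get? k <;> simp [hg] at this ⊢
  induction h with
  | base hs =>
    refine pvRec.base ?_
    rw [PySem.Dict.get?_insert_of_ne _ v (by rintro rfl; simp [hknot] at hs)]; exact hs
  | step hs hsp _ ih =>
    refine pvRec.step ?_ hsp ih
    rw [PySem.Dict.get?_insert_of_ne _ v (by rintro rfl; simp [hknot] at hs)]; exact hs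

theorem pvRec_recon {parent : PySem.Dict String (Option String)} {s : String} {p : List String}
    (h : pvRec parent s p) : ∀ (fuel : Nat), p.length ≤ fuel → ∀ acc,
    pvRecon parent fuel (some s) acc = acc ++ p.reverse := by
  induction h with
  | base hs =>
    intro fuel hf acc
    cases fuel with
    | zero => simp at hf
    | succ f => simp [pvRecon, hs]
  | step hs hsp hrec ih =>
    intro fuel hf acc
    cases fuel with
    | zero => simp at hf
    | succ f =>
      rw [show pvRecon parent (f + 1) (some _) acc
            = pvRecon parent f ((parent.get? _).getD none) (acc ++ [_]) from rfl, hs]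
      simp only [Option.getD_some]
      rw [ih f (by simp at hf; omega) _]
      simp

theorem pvNeighbors_eq (s : String) :
    pvRule1 s ++ pvRule2 s ++ pvRule3 s ++ pvRule4 s = pvNeighbors s := by
  -- bridge the Prop-shaped `if` of A's loops to PySem.List.foldl_append_if
  have hb : ∀ {α : Type} (P : Int → Prop) [DecidablePred P] (f : Int → α) (l : List Int)
      (acc : List α),
      l.foldl (fun results i => if P i then results ++ [f i] else results) acc
        = acc ++ (l.filter (fun i => decide (P i))).map f := by
    intro α P _ f l acc
    rw [show (fun (results : List α) i => if P i then results ++ [f i] else results)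
          = (fun (results : List α) i =>
              if (fun i => decide (P i)) i = true then results ++ [f i] else results) from by
        funext r i; simp]
    exact PySem.List.foldl_append_if _ _ l acc
  have h3 : PySem.Str.len "III" = 3 := by decide
  have h2 : PySem.Str.len "UU" = 2 := by decide
  unfold pvRule1 pvRule2 pvRule3 pvRule4 pvNeighbors pvRewrites
  rw [hb, hb]
  simp only [h3, h2]
  norm_num
  rw [show ((s.length : Int) - 3 + 1) = ((s.length : Int) - 2) from by omega,
    show ((s.length : Int) - 2 + 1) = ((s.length : Int) - 1) from by omega]

theorem pvFold_eq (max_length : Int) (current : String) (p : List String) :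
    ∀ (children : List String) (qa : List String) (front : List (String × List String))
      (back : List (String × List String))
      (visited : PySem.Set String) (parent : PySem.Dict String (Option String)),
    parent.keys.Nodup →
    (∀ x, PySem.Set.contains visited x = parent.contains x) →
    PySem.Set.len visited = (parent.size : Int) →
    List.Forall₂ (fun s pr => pr.1 = s ∧ pvRec parent s pr.2) qa (front ++ back.reverse) →
    pvRec parent current p →
    (let stA := children.foldl
        (fun (acc : List String × PySem.Set String × PySem.Dict String (Option String)) ns =>
          if PySem.Set.contains acc.2.1 ns = false ∧ PySem.Str.len ns ≤ max_length then
            (acc.1 ++ [ns], PySem.Set.add acc.2.1 ns, acc.2.2.insert ns (some current))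
          else acc)
        (qa, visited, parent)
     let stB := children.foldl
        (fun (acc : List (String × List String) × PySem.Set String) ns =>
          if PySem.Set.contains acc.2 ns = false ∧ PySem.Str.len ns ≤ max_length then
            ((ns, p ++ [ns]) :: acc.1, PySem.Set.add acc.2 ns)
          else acc)
        (back, visited)
     stA.2.1 = stB.2 ∧ stA.2.2.keys.Nodup ∧
       (∀ x, PySem.Set.contains stB.2 x = stA.2.2.contains x) ∧
       PySem.Set.len stB.2 = (stA.2.2.size : Int) ∧
       List.Forall₂ (fun s pr => pr.1 = s ∧ pvRec stA.2.2 s pr.2) stA.1 (front ++ stB.1.reverse)) := by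
  intro children
  induction children with
  | nil =>
    intro qa front back visited parent hk hc hl hf hrec
    exact ⟨rfl, hk, fun x => (hc x).symm ▸ hc x, hl, hf⟩
  | cons ns rest ih =>
    intro qa front back visited parent hk hc hl hf hrec
    simp only [List.foldl_cons]
    by_cases hcond : PySem.Set.contains visited ns = false ∧ PySem.Str.len ns ≤ max_length
    · rw [if_pos hcond, if_pos hcond]
      have hnotkey : parent.contains ns = false := by rw [← hc]; exact hcond.1
      have hnm : ns ∉ visited := fun hm => by
        rw [(PySem.Set.contains_iff visited ns).2 hm] at hcond
        simp at hcond
      have hc' : ∀ x, PySem.Set.contains (PySem.Set.add visited ns) x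
          = (parent.insert ns (some current)).contains x := by
        intro x
        rw [PySem.Dict.contains_insert, Bool.eq_iff_iff]
        simp only [PySem.Set.contains_iff, PySem.Set.mem_add, Bool.or_eq_true, beq_iff_eq,
          ← hc x, PySem.Set.contains_iff]
        tauto
      have hl' : PySem.Set.len (PySem.Set.add visited ns)
          = ((parent.insert ns (some current)).size : Int) := by
        rw [PySem.Set.add_of_not_mem hnm, PySem.Dict.size_insert, if_neg (by simp [hnotkey])]
        simp only [PySem.Set.len_eq, List.length_append, List.length_singleton] at hl ⊢
        push_cast
        omega
      have hrec' : pvRec (parent.insert ns (some current)) current p := pvRec_stable hrec hnotkey _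
      have hnew : pvRec (parent.insert ns (some current)) ns (p ++ [ns]) := by
        refine pvRec.step (PySem.Dict.get?_insert_self _ _ _) ?_ hrec'
        intro hmem
        have := pvRec_key hrec ns hmem
        rw [← PySem.Dict.contains_eq_isSome_get?, hnotkey] at this
        exact Bool.false_ne_true this
      have hf' : List.Forall₂
          (fun s pr => pr.1 = s ∧ pvRec (parent.insert ns (some current)) s pr.2)
          (qa ++ [ns]) (front ++ ((ns, p ++ [ns]) :: back).reverse) := by
        rw [List.reverse_cons, ← List.append_assoc]
        exact List.rel_append (hf.imp (fun {a b} hab => ⟨hab.1, pvRec_stable hab.2 hnotkey _⟩))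
          (List.Forall₂.cons ⟨rfl, hnew⟩ List.Forall₂.nil)
      exact ih (qa ++ [ns]) front ((ns, p ++ [ns]) :: back) (PySem.Set.add visited ns)
        (parent.insert ns (some current)) (PySem.Dict.nodup_keys_insert _ _ _ hk) hc' hl' hf' hrec'
    · rw [if_neg hcond, if_neg hcond]
      exact ih qa front back visited parent hk hc hl hf hrec

theorem pvPopB_spec {α : Type} (front back : List α) {y : α} {rest : List α}
    (h : front ++ back.reverse = y :: rest) :
    ∃ f2 b2, pvPopB front back = some (y, f2, b2) ∧ f2 ++ b2.reverse = rest := by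
  cases front with
  | nil =>
    simp only [List.nil_append] at h
    refine ⟨rest, [], ?_, by simp⟩
    simp [pvPopB, h]
  | cons x f =>
    simp only [List.cons_append, List.cons.injEq] at h
    exact ⟨f, back, by simp [pvPopB, h.1], h.2⟩

theorem pvLoop_eq (target : String) (max_length : Int) :
    ∀ (fuel : Nat) (qa : List String) (front back : List (String × List String))
      (visited : PySem.Set String) (parent : PySem.Dict String (Option String)),
    parent.keys.Nodup →
    (∀ x, PySem.Set.contains visited x = parent.contains x) →
    PySem.Set.len visited = (parent.size : Int) →
    List.Forall₂ (fun s pr => pr.1 = s ∧ pvRec parent s pr.2) qa (front ++ back.reverse) →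
    pvLoopA target max_length fuel qa visited parent
      = pvLoopB target max_length fuel front back visited := by
  intro fuel
  induction fuel with
  | zero => intro qa front back visited parent _ _ _ _; rfl
  | succ f ih =>
    intro qa front back visited parent hk hc hl hf
    cases hqa : qa with
    | nil =>
      rw [hqa] at hf
      cases hf2 : front ++ back.reverse with
      | nil =>
        have hfr : front = [] := by cases front <;> simp_all
        have hbk : back = [] := by
          cases hb : back.reverse with
          | nil => simpa using congrArg List.reverse hb
          | cons a l => rw [hfr, hb] at hf2; simp at hf2
        subst hfr hbk hqa
        rfl
      | cons a l => rw [hf2] at hf; cases hf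
    | cons curA qa' =>
      rw [hqa] at hf
      cases hpair : front ++ back.reverse with
      | nil => rw [hpair] at hf; cases hf
      | cons b restQ =>
        rw [hpair] at hf
        cases hf with
        | cons hab hrest =>
        obtain ⟨cur2, path⟩ := b
        obtain ⟨hb1, hb2⟩ := hab
        simp only at hb1 hb2
        subst hb1
        obtain ⟨f2, b2, hpop, hfb2⟩ := pvPopB_spec front back hpair
        rw [← hfb2] at hrest
        by_cases ht : cur2 = target
        · have hrecon := pvRec_recon hb2 parent.size (pvRec_length_le hb2 hk) []
          simp only [pvLoopA, pvLoopB, hpop, if_pos ht, hrecon, List.nil_append,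
            List.reverse_reverse]
        · by_cases hg : max_length < PySem.Str.len cur2 ∨ 10000 < parent.size
          · have hg' : max_length < PySem.Str.len cur2 ∨
                (10000 : Int) < PySem.Set.len visited := by
              rcases hg with hg | hg
              · exact Or.inl hg
              · right; rw [hl]; exact_mod_cast hg
            simp only [pvLoopA, pvLoopB, hpop, if_neg ht, if_pos hg, if_pos hg']
            exact ih qa' f2 b2 visited parent hk hc hl hrest
          · have hg' : ¬ (max_length < PySem.Str.len cur2 ∨
                (10000 : Int) < PySem.Set.len visited) := by
              rcases (not_or.1 hg) with ⟨h1, h2⟩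
              rw [not_or, not_lt, not_lt, hl]
              exact ⟨not_lt.1 h1, by exact_mod_cast Nat.not_lt.1 h2⟩
            have hfold := pvFold_eq max_length cur2 path
              (pvRule1 cur2 ++ pvRule2 cur2 ++ pvRule3 cur2 ++ pvRule4 cur2)
              qa' f2 b2 visited parent hk hc hl hrest hb2
            rw [pvNeighbors_eq cur2] at hfold
            obtain ⟨e1, e2, e3, e4, e5⟩ := hfold
            simp only [pvLoopA, pvLoopB, hpop, if_neg ht, if_neg hg, if_neg hg']
            rw [pvNeighbors_eq cur2]
            rw [← e1] at e3 e4 ⊢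
            exact ih _ _ _ _ _ e2 e3 e4 e5

-- ===== VERDICT (by name: the statement is the Claim_ definition above) =====
theorem miu_system_spec : Claim_equal_miu_system := by
  intro start target max_depth max_length _
  unfold Spec_miu_system miu_system miu_system_alt
  rw [show pvFuelB max_length = pvFuel max_length from by unfold pvFuel pvFuelB; omega]
  apply pvLoop_eq
  · exact PySem.Dict.nodup_keys_insert _ _ _ PySem.Dict.nodup_keys_empty
  · intro x
    rw [Bool.eq_iff_iff]
    simp [PySem.Set.mem_ofList, PySem.Dict.contains_insert, PySem.Dict.contains_empty]
  · rfl
  · exact List.Forall₂.cons ⟨rfl, pvRec.base (PySem.Dict.get?_insert_self _ _ _)⟩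
      List.Forall₂.nil
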